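-- pv_equiv track=rewrite | github.com/jjwatt/aoc2025 | puzzle2.py | gen_invalid_ids
-- ===== SOURCE A (Python) =====
-- from collections.abc import Iterable
--
-- def gen_invalid_ids(ranges: Iterable):
--     """Generate invalid ids for 1st part of puzzle."""
--     for range in ranges:
--         for id in range:
--             str_id = str(id)
--             str_id_len = len(str_id)
--             half_len = str_id_len // 2
--             if str_id[half_len:] == str_id[:half_len]:
--                 yield id
-- ===== SOURCE B (Python) =====
-- def gen_invalid_ids(ranges):
--     """Generate invalid ids for 1st part of puzzle.
--
--     Pure integer arithmetic: count decimal digits with a multiplying loop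
--     and compare the high half against the low half via divmod -- no string
--     conversion or slicing.
--     """
--     for r in ranges:
--         for i in r:
--             if i >= 10:
--                 d, p = 1, 10
--                 while p <= i:
--                     d += 1
--                     p *= 10
--                 if d % 2 == 0:
--                     half = 10 ** (d // 2)
--                     q, rem = divmod(i, half)
--                     if q == rem:
--                         yield i
-- ===== Notes on version B (the rewrite author's own statement) =====
-- stated objective: alternative
-- what changed: B replaces A's string conversion and half-slice comparison by pure integer arithmetic: a multiplying loop counts the decimal digits and divmod by 10^(d/2) compares the high half of the number against the low half, so no string is ever built.
import Mathlib
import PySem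

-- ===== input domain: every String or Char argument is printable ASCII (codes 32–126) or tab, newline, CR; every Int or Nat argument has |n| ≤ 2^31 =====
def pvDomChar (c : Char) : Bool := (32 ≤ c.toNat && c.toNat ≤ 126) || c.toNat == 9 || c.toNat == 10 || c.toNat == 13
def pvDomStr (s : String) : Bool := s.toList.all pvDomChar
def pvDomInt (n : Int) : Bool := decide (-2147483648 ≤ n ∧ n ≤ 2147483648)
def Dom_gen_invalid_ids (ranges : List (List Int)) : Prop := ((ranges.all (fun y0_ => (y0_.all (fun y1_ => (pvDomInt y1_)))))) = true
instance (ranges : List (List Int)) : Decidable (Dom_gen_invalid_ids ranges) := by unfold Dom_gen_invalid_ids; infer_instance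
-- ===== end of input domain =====

-- B replaces A's string half-slice comparison with pure integer arithmetic (digit-count loop + divmod); objective: alternative (same asymptotic cost, no string building).


-- ===== PORT A =====
def gen_invalid_ids (ranges : List (List Int)) : List Int :=
  ranges.foldl (fun acc range_ =>
    range_.foldl (fun acc id =>
      let str_id := PySem.Int.toStr id
      let str_id_len := PySem.Str.len str_id
      let half_len := PySem.Int.floordiv str_id_len 2
      if PySem.Str.slice str_id (some half_len) none == PySem.Str.slice str_id none (some half_len)
      then acc ++ [id] else acc) acc) []

-- ===== PORT B =====
-- the while loop `while p <= i: d += 1; p *= 10`; the fuel argument only makes it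
-- structurally terminating and is never exhausted at the call site (fuel = i.toNat)
def pvCountLoop : Nat → Int → Int → Int → Int × Int
  | 0, _, d, p => (d, p)
  | fuel+1, i, d, p => if p ≤ i then pvCountLoop fuel i (d + 1) (p * 10) else (d, p)

def gen_invalid_ids_alt (ranges : List (List Int)) : List Int :=
  ranges.foldl (fun acc r =>
    r.foldl (fun acc i =>
      if 10 ≤ i then
        let dp := pvCountLoop i.toNat i 1 10
        if PySem.Int.mod dp.1 2 == 0 then
          -- half = 10 ** (d // 2); d ≥ 1 here so the Int exponent is nonnegative and .toNat is exact
          let half := (10 : Int) ^ (PySem.Int.floordiv dp.1 2).toNat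
          if PySem.Int.floordiv i half == PySem.Int.mod i half then acc ++ [i] else acc
        else acc
      else acc) acc) []

-- ===== PRECONDITION & SPEC =====
def Spec_gen_invalid_ids (ranges : List (List Int)) (out : List Int) : Prop := out = gen_invalid_ids_alt ranges
instance (ranges : List (List Int)) (out : List Int) : Decidable (Spec_gen_invalid_ids ranges out) := by unfold Spec_gen_invalid_ids; infer_instance

-- ===== CLAIM (what is proved, stated in full; the proofs are below) =====
def Claim_equal_gen_invalid_ids : Prop := ∀ (ranges : List (List Int)), Dom_gen_invalid_ids ranges → Spec_gen_invalid_ids ranges (gen_invalid_ids ranges)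

-- ===== LEMMAS AND PROOFS =====

-- zero-padded little-endian→string rendering of r to exactly k characters (proof-side only)
def padDigits : Nat → Nat → List Char
  | 0, _ => []
  | k+1, r => padDigits k (r / 10) ++ [(r % 10).digitChar]

lemma length_padDigits (k r : Nat) : (padDigits k r).length = k := by
  induction k generalizing r with
  | zero => rfl
  | succ k ih => simp [padDigits, ih]

lemma digitChar_inj (a b : Nat) (ha : a < 10) (hb : b < 10) (h : a.digitChar = b.digitChar) : a = b := by
  interval_cases a <;> interval_cases b <;> simp_all [Nat.digitChar]

lemma toDigits_split (k q : Nat) : ∀ r : Nat, 0 < q → r < 10 ^ k →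
    Nat.toDigits 10 (q * 10 ^ k + r) = Nat.toDigits 10 q ++ padDigits k r := by
  induction k with
  | zero => intro r _ hr; interval_cases r; simp [padDigits]
  | succ k ih =>
    intro r hq hr
    have hpow : 10 ≤ 10 ^ (k + 1) := Nat.le_self_pow (by omega) 10
    have hge : 10 ^ (k + 1) ≤ q * 10 ^ (k + 1) := Nat.le_mul_of_pos_left _ hq
    rw [Nat.toDigits_eq_if (by norm_num)]
    rw [if_neg (by omega)]
    have he : q * 10 ^ (k + 1) + r = 10 * (q * 10 ^ k + r / 10) + r % 10 := by
      have := Nat.div_add_mod r 10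
      ring_nf
      omega
    have hdiv : (q * 10 ^ (k + 1) + r) / 10 = q * 10 ^ k + r / 10 := by
      rw [he, Nat.mul_add_div (by norm_num), Nat.mod_div_self, Nat.add_zero]
    have hmod : (q * 10 ^ (k + 1) + r) % 10 = r % 10 := by
      rw [he, Nat.mul_add_mod]
      omega
    have hr' : r / 10 < 10 ^ k := by
      have : r < 10 ^ k * 10 := by rw [← pow_succ]; exact hr
      omega
    rw [hdiv, hmod, ih (r / 10) hq hr', padDigits, List.append_assoc]

lemma padDigits_eq_toDigits (r : Nat) : ∀ k : Nat, (Nat.toDigits 10 r).length = k →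
    padDigits k r = Nat.toDigits 10 r := by
  induction r using Nat.strong_induction_on with
  | _ r IH =>
    intro k hk
    by_cases hr : r < 10
    · rw [Nat.toDigits_of_lt_base hr] at hk ⊢
      simp at hk
      subst hk
      simp [padDigits, Nat.mod_eq_of_lt hr]
    · rw [Nat.toDigits_eq_if (by norm_num), if_neg hr] at hk ⊢
      rcases k with _ | k
      · simp at hk
      · have hk' : (Nat.toDigits 10 (r / 10)).length = k := by
          simpa using hk
        rw [padDigits, IH (r / 10) (Nat.div_lt_self (by omega) (by norm_num)) k hk']

lemma padDigits_inj (k : Nat) : ∀ r s : Nat, r < 10 ^ k → s < 10 ^ k →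
    padDigits k r = padDigits k s → r = s := by
  induction k with
  | zero => intro r s hr hs _; omega
  | succ k ih =>
    intro r s hr hs h
    simp only [padDigits] at h
    have hlen : (padDigits k (r / 10)).length = (padDigits k (s / 10)).length := by
      simp [length_padDigits]
    obtain ⟨h1, h2⟩ := List.append_inj h hlen
    have hd : r % 10 = s % 10 := by
      have := List.cons.injEq (r % 10).digitChar [] (s % 10).digitChar []
      simp at h2
      exact digitChar_inj _ _ (Nat.mod_lt _ (by norm_num)) (Nat.mod_lt _ (by norm_num)) h2
    have hr' : r / 10 < 10 ^ k := by
      have : r < 10 ^ k * 10 := by rw [← pow_succ]; exact hr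
      omega
    have hs' : s / 10 < 10 ^ k := by
      have : s < 10 ^ k * 10 := by rw [← pow_succ]; exact hs
      omega
    have := ih (r / 10) (s / 10) hr' hs' h1
    omega

lemma lt_pow_nd (m : Nat) : m < 10 ^ (Nat.toDigits 10 m).length :=
  (Nat.length_toDigits_le_iff (by norm_num) Nat.length_toDigits_pos).mp le_rfl

lemma pow_nd_le (m : Nat) (hm : 0 < m) : 10 ^ ((Nat.toDigits 10 m).length - 1) ≤ m := by
  set n := (Nat.toDigits 10 m).length with hn
  have hnp : 0 < n := Nat.length_toDigits_pos
  rcases Nat.eq_or_lt_of_le hnp with h1 | h1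
  · simpa [← h1] using hm
  · by_contra hcon
    rw [not_le] at hcon
    have : n ≤ n - 1 := (Nat.length_toDigits_le_iff (by norm_num) (by omega)).mpr hcon
    omega

lemma nd_eq (m k : Nat) (hk : 0 < k) (h1 : 10 ^ (k - 1) ≤ m) (h2 : m < 10 ^ k) :
    (Nat.toDigits 10 m).length = k := by
  have hle : (Nat.toDigits 10 m).length ≤ k := (Nat.length_toDigits_le_iff (by norm_num) hk).mpr h2
  have hnp : 0 < (Nat.toDigits 10 m).length := Nat.length_toDigits_pos
  rcases Nat.eq_or_lt_of_le hk with hk1 | hk1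
  · omega
  · by_contra hne
    have : (Nat.toDigits 10 m).length ≤ k - 1 := by omega
    have := (Nat.length_toDigits_le_iff (b := 10) (by norm_num) (k := k - 1) (by omega)).mp this
    omega

lemma pvCountLoop_spec (m : Nat) : ∀ (fuel d : Nat), 0 < d → 10 ^ (d - 1) ≤ m → m < 10 ^ (d + fuel) →
    pvCountLoop fuel (m : Int) (d : Int) ((10 ^ d : Nat) : Int) =
      (((Nat.toDigits 10 m).length : Int), ((10 ^ (Nat.toDigits 10 m).length : Nat) : Int)) := by
  intro fuel
  induction fuel with
  | zero =>
    intro d hd h1 h2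
    rw [pvCountLoop, nd_eq m d hd h1 (by simpa using h2)]
  | succ fuel ih =>
    intro d hd h1 h2
    rw [pvCountLoop]
    by_cases hc : ((10 ^ d : Nat) : Int) ≤ (m : Int)
    · rw [if_pos hc]
      have hc' : 10 ^ d ≤ m := by exact_mod_cast hc
      have e1 : (d : Int) + 1 = ((d + 1 : Nat) : Int) := by push_cast; ring
      have e2 : ((10 ^ d : Nat) : Int) * 10 = ((10 ^ (d + 1) : Nat) : Int) := by push_cast; ring
      rw [e1, e2]
      exact ih (d + 1) (by omega) (by simpa using hc') (by
        have : d + 1 + fuel = d + (fuel + 1) := by omega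
        rw [this]; exact h2)
    · rw [if_neg hc]
      have hc' : m < 10 ^ d := by
        have : ¬ (10 ^ d ≤ m) := fun h => hc (by exact_mod_cast h)
        omega
      rw [nd_eq m d hd h1 hc']

-- for m with an even number 2k of digits, the two half-strings agree iff high half = low half as numbers
lemma even_halves (m k : Nat) (hm : 10 ≤ m) (hn : (Nat.toDigits 10 m).length = 2 * k) :
    ((Nat.toDigits 10 m).drop k = (Nat.toDigits 10 m).take k) ↔ m / 10 ^ k = m % 10 ^ k := by
  have hk : 0 < k := by
    have := Nat.length_toDigits_pos (b := 10) (n := m)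
    omega
  set q := m / 10 ^ k with hqdef
  set r := m % 10 ^ k with hrdef
  have hsplit : q * 10 ^ k + r = m := by
    rw [hqdef, hrdef, Nat.mul_comm]
    exact Nat.div_add_mod m (10 ^ k)
  have hmlo : 10 ^ (2 * k - 1) ≤ m := by
    have := pow_nd_le m (by omega)
    rwa [hn] at this
  have hmhi : m < 10 ^ (2 * k) := by
    have := lt_pow_nd m
    rwa [hn] at this
  have hq1 : 10 ^ (k - 1) ≤ q := by
    rw [hqdef, Nat.le_div_iff_mul_le (by positivity)]
    calc 10 ^ (k - 1) * 10 ^ k = 10 ^ (k - 1 + k) := by rw [pow_add]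
      _ ≤ 10 ^ (2 * k - 1) := by
          apply Nat.pow_le_pow_right (by norm_num)
          omega
      _ ≤ m := hmlo
  have hq0 : 0 < q := lt_of_lt_of_le (by positivity) hq1
  have hqlt : q < 10 ^ k := by
    rw [hqdef, Nat.div_lt_iff_lt_mul (by positivity)]
    calc m < 10 ^ (2 * k) := hmhi
      _ = 10 ^ k * 10 ^ k := by rw [← pow_add]; ring_nf
  have hrlt : r < 10 ^ k := Nat.mod_lt _ (by positivity)
  have hndq : (Nat.toDigits 10 q).length = k := nd_eq q k hk hq1 hqlt
  have hL : Nat.toDigits 10 m = Nat.toDigits 10 q ++ padDigits k r := by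
    rw [← hsplit]; exact toDigits_split k q r hq0 hrlt
  have htake : (Nat.toDigits 10 m).take k = Nat.toDigits 10 q := by
    rw [hL, List.take_left' hndq]
  have hdrop : (Nat.toDigits 10 m).drop k = padDigits k r := by
    rw [hL, List.drop_left' hndq]
  rw [htake, hdrop]
  constructor
  · intro h
    have : padDigits k r = padDigits k q := by
      rw [h, padDigits_eq_toDigits q k hndq]
    exact (padDigits_inj k r q hrlt hqlt this).symm
  · intro h
    rw [← h]
    exact padDigits_eq_toDigits q k hndq

-- the A-side per-id slice test, as a Bool, reduced to a statement about toChars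
lemma condA_eq_halves (i : Int) :
    (PySem.Str.slice (PySem.Int.toStr i)
        (some (PySem.Int.floordiv (PySem.Str.len (PySem.Int.toStr i)) 2)) none ==
      PySem.Str.slice (PySem.Int.toStr i) none
        (some (PySem.Int.floordiv (PySem.Str.len (PySem.Int.toStr i)) 2))) =
    decide ((PySem.Int.toChars i).drop ((PySem.Int.toChars i).length / 2) =
      (PySem.Int.toChars i).take ((PySem.Int.toChars i).length / 2)) := by
  set L := PySem.Int.toChars i with hL
  have hlen : PySem.Str.len (PySem.Int.toStr i) = (L.length : Int) := by
    rw [PySem.Str.len_eq, PySem.Int.toList_toStr]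
  have hh : PySem.Int.floordiv (PySem.Str.len (PySem.Int.toStr i)) 2 = ((L.length / 2 : Nat) : Int) := by
    rw [hlen]
    exact_mod_cast PySem.Int.floordiv_natCast L.length 2
  have hbeq : ∀ s t : String, (s == t) = decide (s.toList = t.toList) := by
    intro s t
    by_cases h : s = t
    · subst h; simp
    · have : s.toList ≠ t.toList := fun hc => h (String.toList_inj.mp hc)
      simp [h, this]
  rw [hbeq, PySem.Str.toList_slice, PySem.Str.toList_slice, PySem.Int.toList_toStr, ← hL, hh]
  have h0 : (0 : Int) ≤ ((L.length / 2 : Nat) : Int) := by positivity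
  rw [show PySem.Chars.slice L (some ((L.length / 2 : Nat) : Int)) none =
        L.drop (L.length / 2) by
      rw [PySem.Chars.slice, PySem.List.slice_from L h0, Int.toNat_natCast],
    show PySem.Chars.slice L none (some ((L.length / 2 : Nat) : Int)) =
        L.take (L.length / 2) by
      rw [PySem.Chars.slice, PySem.List.slice_to L h0, Int.toNat_natCast]]

lemma neg_no_match (i : Int) (hi : i < 0) :
    ¬ ((PySem.Int.toChars i).drop ((PySem.Int.toChars i).length / 2) =
      (PySem.Int.toChars i).take ((PySem.Int.toChars i).length / 2)) := by
  intro heq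
  have hL : PySem.Int.toChars i = '-' :: Nat.toDigits 10 i.natAbs := by
    rw [PySem.Int.toChars, if_pos hi]
  set T := Nat.toDigits 10 i.natAbs with hT
  have ht : 0 < T.length := Nat.length_toDigits_pos
  rw [hL] at heq
  simp only [List.length_cons] at heq
  obtain ⟨h', hh'⟩ : ∃ h', (T.length + 1) / 2 = h' + 1 := ⟨(T.length + 1) / 2 - 1, by omega⟩
  rw [hh', List.drop_succ_cons, List.take_succ_cons] at heq
  have hmem : '-' ∈ T := List.mem_of_mem_drop (heq ▸ List.mem_cons_self)
  have := Nat.isDigit_of_mem_toDigits (by norm_num) (by norm_num) hmem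
  simp [Char.isDigit] at this

lemma small_no_match (m : Nat) (hm : m < 10) :
    ¬ ((Nat.toDigits 10 m).drop ((Nat.toDigits 10 m).length / 2) =
      (Nat.toDigits 10 m).take ((Nat.toDigits 10 m).length / 2)) := by
  rw [Nat.toDigits_of_lt_base hm]
  simp

lemma odd_no_match (m : Nat) (hodd : (Nat.toDigits 10 m).length % 2 = 1) :
    ¬ ((Nat.toDigits 10 m).drop ((Nat.toDigits 10 m).length / 2) =
      (Nat.toDigits 10 m).take ((Nat.toDigits 10 m).length / 2)) := by
  intro heq
  have := congrArg List.length heq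
  simp only [List.length_drop, List.length_take] at this
  omega

-- the per-id step for a nonnegative id with at least two digits
lemma step_eq_nat (acc : List Int) (m : Nat) (hm : 10 ≤ m) :
    (if decide ((Nat.toDigits 10 m).drop ((Nat.toDigits 10 m).length / 2) =
        (Nat.toDigits 10 m).take ((Nat.toDigits 10 m).length / 2)) then acc ++ [(m : Int)] else acc) =
    (if 10 ≤ (m : Int) then
       let dp := pvCountLoop (m : Int).toNat (m : Int) 1 10
       if PySem.Int.mod dp.1 2 == 0 then
         let half := (10 : Int) ^ (PySem.Int.floordiv dp.1 2).toNat
         if PySem.Int.floordiv (m : Int) half == PySem.Int.mod (m : Int) half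
         then acc ++ [(m : Int)] else acc
       else acc
     else acc) := by
  rw [if_pos (by exact_mod_cast hm : (10 : Int) ≤ (m : Int))]
  have hfuel : m < 10 ^ (1 + m) := by
    calc m < 2 ^ m := Nat.lt_two_pow_self
      _ ≤ 10 ^ m := Nat.pow_le_pow_left (by norm_num) m
      _ ≤ 10 ^ (1 + m) := Nat.pow_le_pow_right (by norm_num) (by omega)
  have hloop : pvCountLoop (m : Int).toNat (m : Int) 1 10 =
      (((Nat.toDigits 10 m).length : Int), ((10 ^ (Nat.toDigits 10 m).length : Nat) : Int)) := by
    have h := pvCountLoop_spec m m 1 (by norm_num) (by simpa using (by omega : 1 ≤ m)) hfuel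
    simpa using h
  simp only [hloop]
  set n := (Nat.toDigits 10 m).length with hndef
  have hmod2 : PySem.Int.mod (n : Int) 2 = ((n % 2 : Nat) : Int) := by
    exact_mod_cast PySem.Int.mod_natCast n 2
  have hdiv2 : (PySem.Int.floordiv (n : Int) 2).toNat = n / 2 := by
    rw [show ((2 : Int)) = ((2 : Nat) : Int) by norm_num, PySem.Int.floordiv_natCast]
    exact Int.toNat_natCast _
  have hhalf : (10 : Int) ^ ((PySem.Int.floordiv (n : Int) 2).toNat) = ((10 ^ (n / 2) : Nat) : Int) := by
    rw [hdiv2]; push_cast; ring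
  have hq : PySem.Int.floordiv (m : Int) ((10 ^ (n / 2) : Nat) : Int) = ((m / 10 ^ (n / 2) : Nat) : Int) :=
    PySem.Int.floordiv_natCast m (10 ^ (n / 2))
  have hr : PySem.Int.mod (m : Int) ((10 ^ (n / 2) : Nat) : Int) = ((m % 10 ^ (n / 2) : Nat) : Int) :=
    PySem.Int.mod_natCast m (10 ^ (n / 2))
  simp only [hmod2, hhalf, hq, hr]
  by_cases heven : n % 2 = 0
  · have hiff := even_halves m (n / 2) hm (by omega)
    by_cases hhalves : m / 10 ^ (n / 2) = m % 10 ^ (n / 2)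
    · rw [if_pos (show decide ((Nat.toDigits 10 m).drop (n / 2) = (Nat.toDigits 10 m).take (n / 2)) = true
          by simp only [decide_eq_true_eq]; exact hiff.mpr hhalves)]
      rw [if_pos (show (((n % 2 : Nat) : Int) == 0) = true by simp [heven])]
      rw [if_pos (show (((m / 10 ^ (n / 2) : Nat) : Int) == ((m % 10 ^ (n / 2) : Nat) : Int)) = true
          by rw [beq_iff_eq, Nat.cast_inj]; exact hhalves)]
    · rw [if_neg (show ¬ decide ((Nat.toDigits 10 m).drop (n / 2) = (Nat.toDigits 10 m).take (n / 2)) = true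
          by simp only [decide_eq_true_eq]; exact fun hc => hhalves (hiff.mp hc))]
      rw [if_pos (show (((n % 2 : Nat) : Int) == 0) = true by simp [heven])]
      rw [if_neg (show ¬ (((m / 10 ^ (n / 2) : Nat) : Int) == ((m % 10 ^ (n / 2) : Nat) : Int)) = true
          by rw [beq_iff_eq, Nat.cast_inj]; exact hhalves)]
  · rw [if_neg (show ¬ decide ((Nat.toDigits 10 m).drop (n / 2) = (Nat.toDigits 10 m).take (n / 2)) = true
        by simp only [decide_eq_true_eq]; exact odd_no_match m (by omega))]
    rw [if_neg (show ¬ (((n % 2 : Nat) : Int) == 0) = true by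
      rw [beq_iff_eq, Nat.cast_eq_zero]; exact heven)]

-- the two per-id step functions agree
lemma step_eq (acc : List Int) (i : Int) :
    (let str_id := PySem.Int.toStr i
     let str_id_len := PySem.Str.len str_id
     let half_len := PySem.Int.floordiv str_id_len 2
     if PySem.Str.slice str_id (some half_len) none == PySem.Str.slice str_id none (some half_len)
     then acc ++ [i] else acc) =
    (if 10 ≤ i then
       let dp := pvCountLoop i.toNat i 1 10
       if PySem.Int.mod dp.1 2 == 0 then
         let half := (10 : Int) ^ (PySem.Int.floordiv dp.1 2).toNat
         if PySem.Int.floordiv i half == PySem.Int.mod i half then acc ++ [i] else acc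
       else acc
     else acc) := by
  show (if (PySem.Str.slice (PySem.Int.toStr i)
        (some (PySem.Int.floordiv (PySem.Str.len (PySem.Int.toStr i)) 2)) none ==
      PySem.Str.slice (PySem.Int.toStr i) none
        (some (PySem.Int.floordiv (PySem.Str.len (PySem.Int.toStr i)) 2))) then acc ++ [i] else acc) = _
  rw [condA_eq_halves]
  by_cases h10 : 10 ≤ i
  · have hi' : i = (i.toNat : Int) := (Int.toNat_of_nonneg (by omega)).symm
    have hchars : PySem.Int.toChars i = Nat.toDigits 10 i.toNat := by
      rw [PySem.Int.toChars, if_neg (by omega)]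
    rw [hchars]
    conv_lhs => rw [hi']
    conv_rhs => rw [hi']
    exact step_eq_nat acc i.toNat (by omega)
  · -- i < 10 : neither side collects i
    rw [if_neg h10]
    by_cases hneg : i < 0
    · rw [if_neg (by simp only [decide_eq_true_eq]; exact neg_no_match i hneg)]
    · have hchars : PySem.Int.toChars i = Nat.toDigits 10 i.toNat := by
        rw [PySem.Int.toChars, if_neg (by omega)]
      rw [hchars,
        if_neg (by simp only [decide_eq_true_eq]; exact small_no_match i.toNat (by omega))]

-- ===== VERDICT (by name: the statement is the Claim_ definition above) =====
theorem gen_invalid_ids_spec : Claim_equal_gen_invalid_ids := by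
  intro ranges _
  unfold Spec_gen_invalid_ids gen_invalid_ids gen_invalid_ids_alt
  have hstep : (fun (acc : List Int) (id : Int) =>
      let str_id := PySem.Int.toStr id
      let str_id_len := PySem.Str.len str_id
      let half_len := PySem.Int.floordiv str_id_len 2
      if PySem.Str.slice str_id (some half_len) none == PySem.Str.slice str_id none (some half_len)
      then acc ++ [id] else acc) =
    (fun (acc : List Int) (i : Int) =>
      if 10 ≤ i then
        let dp := pvCountLoop i.toNat i 1 10
        if PySem.Int.mod dp.1 2 == 0 then
          let half := (10 : Int) ^ (PySem.Int.floordiv dp.1 2).toNat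
          if PySem.Int.floordiv i half == PySem.Int.mod i half then acc ++ [i] else acc
        else acc
      else acc) := by
    funext acc i
    exact step_eq acc i
  rw [hstep]
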